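-- pv_equiv track=rewrite | github.com/lemmyhemmingway/adventofcode | 2015/python/day3.py | part2
-- ===== SOURCE A (Python) =====
-- def part2(data: str) -> int:
--     santa_x = 0
--     santa_y = 0
--     robot_x = 0
--     robot_y = 0
--     santa_location = {(santa_x, santa_y)}
--
--     for key, ch in enumerate(data):
--         if key % 2 == 0:
--             if ch == "^":
--                 santa_y += 1
--             elif ch == ">":
--                 santa_x += 1
--             elif ch == "v":
--                 santa_y -= 1
--             elif ch == "<":
--                 santa_x -= 1
--             santa_location.add((santa_x, santa_y))
--         else:
--             if ch == "^":
--                 robot_y += 1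
--             elif ch == ">":
--                 robot_x += 1
--             elif ch == "v":
--                 robot_y -= 1
--             elif ch == "<":
--                 robot_x -= 1
--             santa_location.add((robot_x, robot_y))
--
--     return len(santa_location)
-- ===== SOURCE B (Python) =====
-- def part2(data: str) -> int:
--     delta = {"^": (0, 1), ">": (1, 0), "v": (0, -1), "<": (-1, 0)}
--
--     def houses(moves):
--         x, y = 0, 0
--         seen = {(0, 0)}
--         for ch in moves:
--             dx, dy = delta.get(ch, (0, 0))
--             x, y = x + dx, y + dy
--             seen.add((x, y))
--         return seen
--
--     return len(houses(data[::2]) | houses(data[1::2]))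
-- ===== Notes on version B (the rewrite author's own statement) =====
-- stated objective: alternative
-- what changed: Instead of one interleaved loop that switches on index parity with a four-way branch chain, B slices the input into the two move streams (data[::2], data[1::2]), walks each stream independently with a direction-delta dictionary, and returns the size of the union of the two visited sets.
import Mathlib
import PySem

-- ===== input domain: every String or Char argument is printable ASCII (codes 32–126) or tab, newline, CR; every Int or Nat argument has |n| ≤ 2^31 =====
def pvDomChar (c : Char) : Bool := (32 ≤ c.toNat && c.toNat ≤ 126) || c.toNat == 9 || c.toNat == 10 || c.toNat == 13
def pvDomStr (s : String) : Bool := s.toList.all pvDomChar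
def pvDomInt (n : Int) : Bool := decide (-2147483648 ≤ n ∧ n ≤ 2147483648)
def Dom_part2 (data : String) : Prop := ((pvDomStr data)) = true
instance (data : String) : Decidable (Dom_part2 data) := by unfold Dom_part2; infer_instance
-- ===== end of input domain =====

-- B is an alternative decomposition: two independent per-mover walks over the sliced
-- streams data[::2] / data[1::2] with a delta dictionary, then the size of the union,
-- instead of A's single interleaved parity-switching loop.

-- ===== PORT A =====
-- one step of A's loop body: state (santa_x, santa_y, robot_x, robot_y, santa_location)
def part2StepA (st : Int × Int × Int × Int × PySem.Set (Int × Int))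
    (kc : Int × Char) : Int × Int × Int × Int × PySem.Set (Int × Int) :=
  match st, kc with
  | (sx, sy, rx, ry, loc), (key, ch) =>
    if key % 2 == 0 then
      let p : Int × Int :=
        if ch == '^' then (sx, sy + 1)
        else if ch == '>' then (sx + 1, sy)
        else if ch == 'v' then (sx, sy - 1)
        else if ch == '<' then (sx - 1, sy)
        else (sx, sy)
      (p.1, p.2, rx, ry, PySem.Set.add loc p)
    else
      let p : Int × Int :=
        if ch == '^' then (rx, ry + 1)
        else if ch == '>' then (rx + 1, ry)
        else if ch == 'v' then (rx, ry - 1)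
        else if ch == '<' then (rx - 1, ry)
        else (rx, ry)
      (sx, sy, p.1, p.2, PySem.Set.add loc p)

def part2 (data : String) : Int :=
  let init : Int × Int × Int × Int × PySem.Set (Int × Int) :=
    (0, 0, 0, 0, PySem.Set.ofList [((0 : Int), (0 : Int))])
  let fin := (PySem.List.enumerate data.toList 0).foldl part2StepA init
  PySem.Set.len fin.2.2.2.2

-- ===== PORT B =====
-- delta = {"^": (0, 1), ">": (1, 0), "v": (0, -1), "<": (-1, 0)}
def part2Delta : PySem.Dict Char (Int × Int) :=
  PySem.Dict.ofList [('^', ((0 : Int), (1 : Int))), ('>', (1, 0)), ('v', (0, -1)), ('<', (-1, 0))]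

-- port of the slices data[::2] / data[1::2] (the builtin slice, as the corresponding Lean function)
mutual
def part2Evens : List Char → List Char
  | [] => []
  | c :: t => c :: part2Odds t
def part2Odds : List Char → List Char
  | [] => []
  | _ :: t => part2Evens t
end

-- the helper 'houses': walk one stream, collecting every visited position (start included)
def part2Houses (moves : List Char) : PySem.Set (Int × Int) :=
  (moves.foldl
    (fun (st : Int × Int × PySem.Set (Int × Int)) ch =>
      let (x, y, seen) := st
      let d := PySem.Dict.getD part2Delta ch (0, 0)
      let x' := x + d.1
      let y' := y + d.2
      (x', y', PySem.Set.add seen (x', y')))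
    (0, 0, PySem.Set.ofList [((0 : Int), (0 : Int))])).2.2

def part2_alt (data : String) : Int :=
  PySem.Set.len
    (PySem.Set.union (part2Houses (part2Evens data.toList)) (part2Houses (part2Odds data.toList)))

-- ===== PRECONDITION & SPEC =====
def Spec_part2 (data : String) (out : Int) : Prop := out = part2_alt data
instance (data : String) (out : Int) : Decidable (Spec_part2 data out) := by unfold Spec_part2; infer_instance

-- ===== CLAIM (what is proved, stated in full; the proofs are below) =====
def Claim_equal_part2 : Prop := ∀ (data : String), Dom_part2 data → Spec_part2 data (part2 data)

-- ===== LEMMAS AND PROOFS =====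

-- abstract one-mover step and the list of visited positions along a stream
def pvStep (pos : Int × Int) (c : Char) : Int × Int :=
  if c = '^' then (pos.1, pos.2 + 1)
  else if c = '>' then (pos.1 + 1, pos.2)
  else if c = 'v' then (pos.1, pos.2 - 1)
  else if c = '<' then (pos.1 - 1, pos.2)
  else pos

def pvVisits : List Char → Int × Int → List (Int × Int)
  | [], _ => []
  | c :: t, pos => pvStep pos c :: pvVisits t (pvStep pos c)

lemma pvDelta_eq (pos : Int × Int) (c : Char) :
    (pos.1 + (PySem.Dict.getD part2Delta c (0, 0)).1,
     pos.2 + (PySem.Dict.getD part2Delta c (0, 0)).2) = pvStep pos c := by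
  by_cases h1 : c = '^'
  · subst h1
    rw [show PySem.Dict.getD part2Delta '^' ((0 : Int), (0 : Int)) = (0, 1) from by decide]
    simp [pvStep]
  by_cases h2 : c = '>'
  · subst h2
    rw [show PySem.Dict.getD part2Delta '>' ((0 : Int), (0 : Int)) = (1, 0) from by decide]
    simp [pvStep]
  by_cases h3 : c = 'v'
  · subst h3
    rw [show PySem.Dict.getD part2Delta 'v' ((0 : Int), (0 : Int)) = (0, -1) from by decide]
    simp [pvStep, sub_eq_add_neg]
  by_cases h4 : c = '<'
  · subst h4
    rw [show PySem.Dict.getD part2Delta '<' ((0 : Int), (0 : Int)) = (-1, 0) from by decide]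
    simp [pvStep, sub_eq_add_neg]
  have e1 : ('^' == c) = false := beq_eq_false_iff_ne.mpr (Ne.symm h1)
  have e2 : ('>' == c) = false := beq_eq_false_iff_ne.mpr (Ne.symm h2)
  have e3 : ('v' == c) = false := beq_eq_false_iff_ne.mpr (Ne.symm h3)
  have e4 : ('<' == c) = false := beq_eq_false_iff_ne.mpr (Ne.symm h4)
  have hg : PySem.Dict.getD part2Delta c ((0 : Int), (0 : Int)) = (0, 0) := by
    simp [part2Delta, PySem.Dict.getD, PySem.Dict.get?, PySem.Dict.ofList, PySem.Dict.update,
      PySem.Dict.insert, PySem.Dict.empty, PySem.Dict.contains, List.find?, e1, e2, e3, e4]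
  rw [hg]
  simp [pvStep, h1, h2, h3, h4]

lemma pvHouses_mem (l : List Char) :
    ∀ (x y : Int) (S : PySem.Set (Int × Int)) (hS : S.Nodup) (p : Int × Int),
      (p ∈ (l.foldl
        (fun (st : Int × Int × PySem.Set (Int × Int)) ch =>
          let (x, y, seen) := st
          let d := PySem.Dict.getD part2Delta ch (0, 0)
          let x' := x + d.1
          let y' := y + d.2
          (x', y', PySem.Set.add seen (x', y')))
        (x, y, S)).2.2 ↔ p ∈ S ∨ p ∈ pvVisits l (x, y)) ∧
      (l.foldl
        (fun (st : Int × Int × PySem.Set (Int × Int)) ch =>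
          let (x, y, seen) := st
          let d := PySem.Dict.getD part2Delta ch (0, 0)
          let x' := x + d.1
          let y' := y + d.2
          (x', y', PySem.Set.add seen (x', y')))
        (x, y, S)).2.2.Nodup := by
  induction l with
  | nil => intro x y S hS p; simpa [pvVisits] using hS
  | cons c t ih =>
    intro x y S hS p
    have hst := pvDelta_eq (x, y) c
    simp only [List.foldl_cons]
    have hadd : (PySem.Set.add S (pvStep (x, y) c)).Nodup := PySem.Set.nodup_add _ _ hS
    have := ih (pvStep (x, y) c).1 (pvStep (x, y) c).2 (PySem.Set.add S (pvStep (x, y) c)) hadd p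
    constructor
    · rw [show ((x + (PySem.Dict.getD part2Delta c (0, 0)).1,
          y + (PySem.Dict.getD part2Delta c (0, 0)).2,
          PySem.Set.add S (x + (PySem.Dict.getD part2Delta c (0, 0)).1,
            y + (PySem.Dict.getD part2Delta c (0, 0)).2)) :
            Int × Int × PySem.Set (Int × Int)) =
          ((pvStep (x, y) c).1, (pvStep (x, y) c).2, PySem.Set.add S (pvStep (x, y) c)) by
        rw [← hst]]
      rw [this.1, PySem.Set.mem_add]
      simp [pvVisits]; tauto
    · rw [show ((x + (PySem.Dict.getD part2Delta c (0, 0)).1,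
          y + (PySem.Dict.getD part2Delta c (0, 0)).2,
          PySem.Set.add S (x + (PySem.Dict.getD part2Delta c (0, 0)).1,
            y + (PySem.Dict.getD part2Delta c (0, 0)).2)) :
            Int × Int × PySem.Set (Int × Int)) =
          ((pvStep (x, y) c).1, (pvStep (x, y) c).2, PySem.Set.add S (pvStep (x, y) c)) by
        rw [← hst]]
      exact this.2

lemma pvStepA_even (sx sy rx ry : Int) (S : PySem.Set (Int × Int)) (key : Int) (ch : Char)
    (h : key % 2 = 0) :
    part2StepA (sx, sy, rx, ry, S) (key, ch) =
      ((pvStep (sx, sy) ch).1, (pvStep (sx, sy) ch).2, rx, ry,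
        PySem.Set.add S (pvStep (sx, sy) ch)) := by
  simp only [part2StepA, pvStep, h]
  by_cases h1 : ch = '^' <;> by_cases h2 : ch = '>' <;> by_cases h3 : ch = 'v' <;>
    by_cases h4 : ch = '<' <;> simp_all

lemma pvStepA_odd (sx sy rx ry : Int) (S : PySem.Set (Int × Int)) (key : Int) (ch : Char)
    (h : ¬ key % 2 = 0) :
    part2StepA (sx, sy, rx, ry, S) (key, ch) =
      (sx, sy, (pvStep (rx, ry) ch).1, (pvStep (rx, ry) ch).2,
        PySem.Set.add S (pvStep (rx, ry) ch)) := by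
  simp only [part2StepA, pvStep]
  rw [if_neg (by simpa using h)]
  by_cases h1 : ch = '^' <;> by_cases h2 : ch = '>' <;> by_cases h3 : ch = 'v' <;>
    by_cases h4 : ch = '<' <;> simp_all

lemma pvFoldA (l : List Char) :
    ∀ (n sx sy rx ry : Int) (S : PySem.Set (Int × Int)) (hS : S.Nodup) (p : Int × Int),
      (p ∈ ((PySem.List.enumerate l n).foldl part2StepA (sx, sy, rx, ry, S)).2.2.2.2 ↔
        p ∈ S ∨ (if n % 2 = 0
          then p ∈ pvVisits (part2Evens l) (sx, sy) ∨ p ∈ pvVisits (part2Odds l) (rx, ry)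
          else p ∈ pvVisits (part2Odds l) (sx, sy) ∨ p ∈ pvVisits (part2Evens l) (rx, ry))) ∧
      ((PySem.List.enumerate l n).foldl part2StepA (sx, sy, rx, ry, S)).2.2.2.2.Nodup := by
  induction l with
  | nil => intro n sx sy rx ry S hS p; simp [PySem.List.enumerate_nil, part2Evens, part2Odds, pvVisits, hS]
  | cons c t ih =>
    intro n sx sy rx ry S hS p
    rw [PySem.List.enumerate_cons, List.foldl_cons]
    have hpar : (n + 1) % 2 = 0 ↔ ¬ n % 2 = 0 := by omega
    by_cases h : n % 2 = 0
    · rw [pvStepA_even _ _ _ _ _ _ _ h]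
      have hadd := PySem.Set.nodup_add S (pvStep (sx, sy) c) hS
      have := ih (n + 1) (pvStep (sx, sy) c).1 (pvStep (sx, sy) c).2 rx ry
        (PySem.Set.add S (pvStep (sx, sy) c)) hadd p
      refine ⟨?_, this.2⟩
      rw [this.1, PySem.Set.mem_add]
      have h1 : ¬ (n + 1) % 2 = 0 := by omega
      simp only [if_neg h1, if_pos h, part2Evens, part2Odds, pvVisits, List.mem_cons]
      tauto
    · rw [pvStepA_odd _ _ _ _ _ _ _ h]
      have hadd := PySem.Set.nodup_add S (pvStep (rx, ry) c) hS
      have := ih (n + 1) sx sy (pvStep (rx, ry) c).1 (pvStep (rx, ry) c).2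
        (PySem.Set.add S (pvStep (rx, ry) c)) hadd p
      refine ⟨?_, this.2⟩
      rw [this.1, PySem.Set.mem_add]
      have h1 : (n + 1) % 2 = 0 := by omega
      simp only [if_pos h1, if_neg h, part2Evens, part2Odds, pvVisits, List.mem_cons]
      tauto

lemma pvHouses_spec (l : List Char) (p : Int × Int) :
    (p ∈ part2Houses l ↔ p = (0, 0) ∨ p ∈ pvVisits l (0, 0)) ∧ (part2Houses l).Nodup := by
  have h := pvHouses_mem l 0 0 (PySem.Set.ofList [((0 : Int), (0 : Int))]) (PySem.Set.nodup_ofList _) p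
  unfold part2Houses
  constructor
  · rw [h.1, PySem.Set.mem_ofList]; simp
  · exact h.2

-- ===== VERDICT (by name: the statement is the Claim_ definition above) =====
theorem part2_spec : Claim_equal_part2 := by
  intro data _
  unfold Spec_part2 part2 part2_alt
  simp only
  set l := data.toList
  have hA := pvFoldA l 0 0 0 0 0 (PySem.Set.ofList [((0 : Int), (0 : Int))]) (PySem.Set.nodup_ofList _)
  have hAnodup := (hA (0, 0)).2
  have hBnodup : (PySem.Set.union (part2Houses (part2Evens l)) (part2Houses (part2Odds l))).Nodup :=
    PySem.Set.nodup_union _ _ (pvHouses_spec (part2Evens l) (0, 0)).2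
  have hperm :
      ((PySem.List.enumerate l 0).foldl part2StepA
        (0, 0, 0, 0, PySem.Set.ofList [((0 : Int), (0 : Int))])).2.2.2.2.Perm
      (PySem.Set.union (part2Houses (part2Evens l)) (part2Houses (part2Odds l))) := by
    rw [List.perm_ext_iff_of_nodup hAnodup hBnodup]
    intro p
    rw [(hA p).1, PySem.Set.mem_union, (pvHouses_spec (part2Evens l) p).1,
      (pvHouses_spec (part2Odds l) p).1, PySem.Set.mem_ofList]
    simp only [if_pos (by norm_num : (0 : Int) % 2 = 0), List.mem_singleton]
    tauto
  simp only [PySem.Set.len]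
  exact_mod_cast hperm.length_eq
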